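-- pv_equiv track=rewrite | github.com/polarbear333/heuristic-tetris-DQN | ai_training/rl_agent/environment/features.py | calculate_number_of_holes
-- ===== SOURCE A (Python) =====
-- def calculate_number_of_holes(board, width, height):
--         holes = 0
--         for x in range(width):
--             block_found = False
--             for y in range(height):
--                 if board[y][x] != (0, 0, 0):
--                     block_found = True
--                 if block_found and board[y][x] == (0, 0, 0):
--                     holes += 1
--         return holes
-- ===== SOURCE B (Python) =====
-- def calculate_number_of_holes(board, width, height):
--     holes = 0
--     for x in range(width):
--         col = [board[y][x] for y in range(height)]
--         top = next((y for y, cell in enumerate(col) if cell != (0, 0, 0)), None)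
--         if top is not None:
--             filled = sum(1 for cell in col if cell != (0, 0, 0))
--             holes += (height - top) - filled
--     return holes
-- ===== Notes on version B (the rewrite author's own statement) =====
-- stated objective: simpler
-- what changed: Replaces the block_found flag and per-cell conditional counting with per-column closed-form arithmetic: find the index of the topmost filled cell and the number of filled cells, then add (height - top) - filled.
import Mathlib
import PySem

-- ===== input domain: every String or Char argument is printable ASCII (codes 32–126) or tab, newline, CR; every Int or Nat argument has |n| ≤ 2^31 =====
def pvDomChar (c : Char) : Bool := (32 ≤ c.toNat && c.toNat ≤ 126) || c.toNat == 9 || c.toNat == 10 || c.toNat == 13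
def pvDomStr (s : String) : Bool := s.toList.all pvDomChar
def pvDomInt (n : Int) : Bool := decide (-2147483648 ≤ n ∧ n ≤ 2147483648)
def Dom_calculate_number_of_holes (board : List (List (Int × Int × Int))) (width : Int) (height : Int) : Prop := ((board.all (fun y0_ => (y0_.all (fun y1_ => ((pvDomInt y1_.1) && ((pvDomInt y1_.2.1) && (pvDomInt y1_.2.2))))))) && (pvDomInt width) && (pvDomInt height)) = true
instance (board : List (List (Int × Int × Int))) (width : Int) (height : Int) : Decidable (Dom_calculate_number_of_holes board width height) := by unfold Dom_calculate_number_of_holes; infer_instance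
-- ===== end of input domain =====

-- B replaces A's block_found flag with per-column closed-form arithmetic (top index + filled count); objective: simpler.

-- board[y][x]; total form, exact under Pre_ (indices are in range there)
def pvCell (board : List (List (Int × Int × Int))) (x y : Int) : Int × Int × Int :=
  PySem.List.pyGetD (PySem.List.pyGetD board y []) x (0, 0, 0)

-- ===== PORT A =====
-- one inner-loop iteration of A: update block_found, then maybe count a hole
def pvStepA (st : Bool × Int) (c : Int × Int × Int) : Bool × Int :=
  let bf := if c ≠ ((0, 0, 0) : Int × Int × Int) then true else st.1
  (bf, if bf = true ∧ c = (0, 0, 0) then st.2 + 1 else st.2)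

def calculate_number_of_holes (board : List (List (Int × Int × Int))) (width : Int) (height : Int) : Int :=
  (PySem.List.pyRange 0 width 1).foldl (fun holes x =>
    ((PySem.List.pyRange 0 height 1).foldl
      (fun st y => pvStepA st (pvCell board x y)) (false, holes)).2) 0

-- ===== PORT B =====
def pvNZ (c : Int × Int × Int) : Bool := decide (c ≠ ((0, 0, 0) : Int × Int × Int))

def calculate_number_of_holes_alt (board : List (List (Int × Int × Int))) (width : Int) (height : Int) : Int :=
  (PySem.List.pyRange 0 width 1).foldl (fun holes x =>
    let col := (PySem.List.pyRange 0 height 1).map (fun y => pvCell board x y)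
    match col.findIdx? pvNZ with
    | none => holes
    | some top => holes + ((height - (top : Int)) - (col.countP pvNZ : Int))) 0

-- ===== PRECONDITION & SPEC =====
-- Pre_ excludes exactly the inputs where Python A raises IndexError: when both loops run,
-- the first `height` rows must exist and each be at least `width` wide.
def Pre_calculate_number_of_holes (board : List (List (Int × Int × Int))) (width : Int) (height : Int) : Prop :=
  0 < width → 0 < height →
    (height ≤ (board.length : Int) ∧ ∀ row ∈ board.take height.toNat, width ≤ (row.length : Int))
instance (board : List (List (Int × Int × Int))) (width : Int) (height : Int) : Decidable (Pre_calculate_number_of_holes board width height) := by unfold Pre_calculate_number_of_holes; infer_instance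

def pvWitness_calculate_number_of_holes : (List (List (Int × Int × Int))) × Int × Int :=
  ([[(1, 0, 0)], [(0, 0, 0)]], 1, 2)

def Spec_calculate_number_of_holes (board : List (List (Int × Int × Int))) (width : Int) (height : Int) (out : Int) : Prop := out = calculate_number_of_holes_alt board width height
instance (board : List (List (Int × Int × Int))) (width : Int) (height : Int) (out : Int) : Decidable (Spec_calculate_number_of_holes board width height out) := by unfold Spec_calculate_number_of_holes; infer_instance

-- ===== CLAIM (what is proved, stated in full; the proofs are below) =====
def Claim_equal_calculate_number_of_holes : Prop := ∀ (board : List (List (Int × Int × Int))) (width : Int) (height : Int), Dom_calculate_number_of_holes board width height → Pre_calculate_number_of_holes board width height → Spec_calculate_number_of_holes board width height (calculate_number_of_holes board width height)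

-- ===== LEMMAS AND PROOFS =====

-- once the flag is set, A counts exactly the empty cells of the rest of the column
lemma stepA_foldl_true (cs : List (Int × Int × Int)) (h : Int) :
    (cs.foldl pvStepA (true, h)).2 = h + ((cs.length : Int) - (cs.countP pvNZ : Int)) := by
  induction cs generalizing h with
  | nil => simp
  | cons c cs ih =>
    by_cases hc : c = ((0, 0, 0) : Int × Int × Int)
    · have h1 : pvStepA (true, h) c = (true, h + 1) := by simp [pvStepA, hc]
      rw [List.foldl_cons, h1, ih]
      simp [pvNZ, hc]
      ring
    · have h1 : pvStepA (true, h) c = (true, h) := by simp [pvStepA, hc]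
      rw [List.foldl_cons, h1, ih]
      simp [pvNZ, hc]

-- from a clear flag, A's column result equals B's closed form over the column list
lemma stepA_foldl_false (cs : List (Int × Int × Int)) (h : Int) :
    (cs.foldl pvStepA (false, h)).2 =
      match cs.findIdx? pvNZ with
      | none => h
      | some t => h + (((cs.length : Int) - (t : Int)) - (cs.countP pvNZ : Int)) := by
  induction cs generalizing h with
  | nil => simp
  | cons c cs ih =>
    rw [List.foldl_cons, List.findIdx?_cons]
    by_cases hc : c = ((0, 0, 0) : Int × Int × Int)
    · have hp : pvNZ c = false := by simp [pvNZ, hc]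
      have h1 : pvStepA (false, h) c = (false, h) := by simp [pvStepA, hc]
      rw [h1, ih, hp]
      cases hfi : cs.findIdx? pvNZ with
      | none => simp
      | some t => simp [hp]
    · have hp : pvNZ c = true := by simp [pvNZ, hc]
      have h1 : pvStepA (false, h) c = (true, h) := by simp [pvStepA, hc]
      rw [h1, stepA_foldl_true, hp]
      simp [hp]

-- per-column agreement of the two ports' loop bodies
lemma col_eq (board : List (List (Int × Int × Int))) (height x holes : Int) :
    ((PySem.List.pyRange 0 height 1).foldl
        (fun st y => pvStepA st (pvCell board x y)) (false, holes)).2 =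
      (let col := (PySem.List.pyRange 0 height 1).map (fun y => pvCell board x y)
       match col.findIdx? pvNZ with
       | none => holes
       | some top => holes + ((height - (top : Int)) - (col.countP pvNZ : Int))) := by
  by_cases hle : height ≤ 0
  · simp [PySem.List.pyRange_one_eq_nil hle]
  · have hfold := (List.foldl_map (f := fun y => pvCell board x y) (g := pvStepA)
      (l := PySem.List.pyRange 0 height 1) (init := ((false, holes) : Bool × Int))).symm
    rw [hfold, stepA_foldl_false]
    have hlen : ((((PySem.List.pyRange 0 height 1).map (fun y => pvCell board x y)).length : Int)) = height := by
      simp [PySem.List.length_pyRange_one]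
      omega
    cases hfi : ((PySem.List.pyRange 0 height 1).map (fun y => pvCell board x y)).findIdx? pvNZ with
    | none => simp [hfi]
    | some t =>
      simp only [hfi]
      rw [hlen]

-- ===== VERDICT (by name: the statement is the Claim_ definition above) =====
theorem calculate_number_of_holes_spec : Claim_equal_calculate_number_of_holes := by
  intro board width height _ _
  unfold Spec_calculate_number_of_holes calculate_number_of_holes calculate_number_of_holes_alt
  refine PySem.List.foldl_congr_mem _ _ _ _ ?_
  intro acc x _
  exact col_eq board height x acc
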